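-- pv_equiv track=rewrite | github.com/Yzy888666/fuckucodepy | src/fuck_u_code/metrics/function_length.py | _get_length_distribution
-- ===== SOURCE A (Python) =====
-- from typing import List, Dict, Any
--
-- def _get_length_distribution(lengths: List[int]) -> Dict[str, int]:
--     """
--     获取函数长度分布统计
--
--     Args:
--         lengths: 长度列表
--
--     Returns:
--         Dict[str, int]: 分布统计
--     """
--     distribution = {
--         "short_1_20": 0,     # 1-20行
--         "medium_21_40": 0,   # 21-40行
--         "long_41_80": 0,     # 41-80行
--         "very_long_81_120": 0,  # 81-120行
--         "extreme_121_plus": 0,  # 121行以上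
--     }
--
--     for length in lengths:
--         if 1 <= length <= 20:
--             distribution["short_1_20"] += 1
--         elif 21 <= length <= 40:
--             distribution["medium_21_40"] += 1
--         elif 41 <= length <= 80:
--             distribution["long_41_80"] += 1
--         elif 81 <= length <= 120:
--             distribution["very_long_81_120"] += 1
--         else:
--             distribution["extreme_121_plus"] += 1
--
--     return distribution
-- ===== SOURCE B (Python) =====
-- def _get_length_distribution(lengths):
--     return {
--         "short_1_20": sum(1 for l in lengths if 1 <= l <= 20),
--         "medium_21_40": sum(1 for l in lengths if 21 <= l <= 40),
--         "long_41_80": sum(1 for l in lengths if 41 <= l <= 80),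
--         "very_long_81_120": sum(1 for l in lengths if 81 <= l <= 120),
--         "extreme_121_plus": sum(1 for l in lengths if l <= 0 or l > 120),
--     }
-- ===== Notes on version B (the rewrite author's own statement) =====
-- stated objective: simpler
-- what changed: Replaces the single stateful branching loop over a mutable counter dict with a dict literal of five independent generator-sum counts, one per bucket (non-positive lengths counted as extreme, matching A's else branch).
import Mathlib
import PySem

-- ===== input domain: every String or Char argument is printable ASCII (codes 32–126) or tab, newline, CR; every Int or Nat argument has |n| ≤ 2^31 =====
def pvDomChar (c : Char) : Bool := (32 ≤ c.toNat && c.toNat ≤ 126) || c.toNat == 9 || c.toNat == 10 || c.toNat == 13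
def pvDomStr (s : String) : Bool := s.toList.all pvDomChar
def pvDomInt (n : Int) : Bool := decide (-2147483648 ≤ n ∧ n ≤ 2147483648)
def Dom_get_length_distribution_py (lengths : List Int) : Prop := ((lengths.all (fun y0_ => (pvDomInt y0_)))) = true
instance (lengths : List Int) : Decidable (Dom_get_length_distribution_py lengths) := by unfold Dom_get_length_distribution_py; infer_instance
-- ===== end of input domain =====

-- B changes the decomposition: five independent bucket counts instead of one stateful branching pass; equal speed, simpler.

-- ===== PORT A =====
-- hand port of `distribution[k] += 1`: first-match in-place increment in the assoc list
-- (exact here: every key used is present in the initial dict, so Python's KeyError path is unreachable)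
def pvBump (d : List (String × Int)) (k : String) : List (String × Int) :=
  match d with
  | [] => []
  | (k', v) :: rest => if k' == k then (k', v + 1) :: rest else (k', v) :: pvBump rest k

def get_length_distribution_py (lengths : List Int) : List (String × Int) :=
  let distribution : List (String × Int) :=
    [("short_1_20", 0), ("medium_21_40", 0), ("long_41_80", 0),
     ("very_long_81_120", 0), ("extreme_121_plus", 0)]
  lengths.foldl (fun d length =>
    if 1 ≤ length ∧ length ≤ 20 then pvBump d "short_1_20"
    else if 21 ≤ length ∧ length ≤ 40 then pvBump d "medium_21_40"
    else if 41 ≤ length ∧ length ≤ 80 then pvBump d "long_41_80"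
    else if 81 ≤ length ∧ length ≤ 120 then pvBump d "very_long_81_120"
    else pvBump d "extreme_121_plus") distribution

-- ===== PORT B =====
def get_length_distribution_py_alt (lengths : List Int) : List (String × Int) :=
  [("short_1_20", (lengths.countP (fun l => decide (1 ≤ l ∧ l ≤ 20)) : Int)),
   ("medium_21_40", (lengths.countP (fun l => decide (21 ≤ l ∧ l ≤ 40)) : Int)),
   ("long_41_80", (lengths.countP (fun l => decide (41 ≤ l ∧ l ≤ 80)) : Int)),
   ("very_long_81_120", (lengths.countP (fun l => decide (81 ≤ l ∧ l ≤ 120)) : Int)),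
   ("extreme_121_plus", (lengths.countP (fun l => decide (l ≤ 0 ∨ 120 < l)) : Int))]

-- ===== PRECONDITION & SPEC =====
def Spec_get_length_distribution_py (lengths : List Int) (out : List (String × Int)) : Prop := out = get_length_distribution_py_alt lengths
instance (lengths : List Int) (out : List (String × Int)) : Decidable (Spec_get_length_distribution_py lengths out) := by unfold Spec_get_length_distribution_py; infer_instance

-- ===== CLAIM (what is proved, stated in full; the proofs are below) =====
def Claim_equal_get_length_distribution_py : Prop := ∀ (lengths : List Int), Dom_get_length_distribution_py lengths → Spec_get_length_distribution_py lengths (get_length_distribution_py lengths)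

-- ===== LEMMAS AND PROOFS =====

-- pvBump evaluated on the literal 5-key counter state, once per key
lemma bump1 (a b c d e : Int) :
    pvBump [("short_1_20", a), ("medium_21_40", b), ("long_41_80", c),
            ("very_long_81_120", d), ("extreme_121_plus", e)] "short_1_20"
    = [("short_1_20", a + 1), ("medium_21_40", b), ("long_41_80", c),
       ("very_long_81_120", d), ("extreme_121_plus", e)] := by simp [pvBump]

lemma bump2 (a b c d e : Int) :
    pvBump [("short_1_20", a), ("medium_21_40", b), ("long_41_80", c),
            ("very_long_81_120", d), ("extreme_121_plus", e)] "medium_21_40"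
    = [("short_1_20", a), ("medium_21_40", b + 1), ("long_41_80", c),
       ("very_long_81_120", d), ("extreme_121_plus", e)] := by simp [pvBump]

lemma bump3 (a b c d e : Int) :
    pvBump [("short_1_20", a), ("medium_21_40", b), ("long_41_80", c),
            ("very_long_81_120", d), ("extreme_121_plus", e)] "long_41_80"
    = [("short_1_20", a), ("medium_21_40", b), ("long_41_80", c + 1),
       ("very_long_81_120", d), ("extreme_121_plus", e)] := by simp [pvBump]

lemma bump4 (a b c d e : Int) :
    pvBump [("short_1_20", a), ("medium_21_40", b), ("long_41_80", c),
            ("very_long_81_120", d), ("extreme_121_plus", e)] "very_long_81_120"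
    = [("short_1_20", a), ("medium_21_40", b), ("long_41_80", c),
       ("very_long_81_120", d + 1), ("extreme_121_plus", e)] := by simp [pvBump]

lemma bump5 (a b c d e : Int) :
    pvBump [("short_1_20", a), ("medium_21_40", b), ("long_41_80", c),
            ("very_long_81_120", d), ("extreme_121_plus", e)] "extreme_121_plus"
    = [("short_1_20", a), ("medium_21_40", b), ("long_41_80", c),
       ("very_long_81_120", d), ("extreme_121_plus", e + 1)] := by simp [pvBump]

-- loop invariant: folding A's body from an arbitrary counter state adds each bucket's count
lemma fold_counts (lengths : List Int) (a b c d e : Int) :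
    lengths.foldl (fun d length =>
      if 1 ≤ length ∧ length ≤ 20 then pvBump d "short_1_20"
      else if 21 ≤ length ∧ length ≤ 40 then pvBump d "medium_21_40"
      else if 41 ≤ length ∧ length ≤ 80 then pvBump d "long_41_80"
      else if 81 ≤ length ∧ length ≤ 120 then pvBump d "very_long_81_120"
      else pvBump d "extreme_121_plus")
      [("short_1_20", a), ("medium_21_40", b), ("long_41_80", c),
       ("very_long_81_120", d), ("extreme_121_plus", e)]
    = [("short_1_20", a + (lengths.countP (fun l => decide (1 ≤ l ∧ l ≤ 20)) : Int)),
       ("medium_21_40", b + (lengths.countP (fun l => decide (21 ≤ l ∧ l ≤ 40)) : Int)),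
       ("long_41_80", c + (lengths.countP (fun l => decide (41 ≤ l ∧ l ≤ 80)) : Int)),
       ("very_long_81_120", d + (lengths.countP (fun l => decide (81 ≤ l ∧ l ≤ 120)) : Int)),
       ("extreme_121_plus", e + (lengths.countP (fun l => decide (l ≤ 0 ∨ 120 < l)) : Int))] := by
  induction lengths generalizing a b c d e with
  | nil => simp
  | cons x xs ih =>
    simp only [List.foldl_cons]
    by_cases h1 : 1 ≤ x ∧ x ≤ 20
    · rw [if_pos h1, bump1, ih]
      simp only [List.countP_cons, decide_eq_true_eq, List.cons.injEq, Prod.mk.injEq,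
        true_and, and_true]
      refine ⟨?_, ?_, ?_, ?_, ?_⟩ <;> (split_ifs <;> push_cast <;> omega)
    · rw [if_neg h1]
      by_cases h2 : 21 ≤ x ∧ x ≤ 40
      · rw [if_pos h2, bump2, ih]
        simp only [List.countP_cons, decide_eq_true_eq, List.cons.injEq, Prod.mk.injEq,
          true_and, and_true]
        refine ⟨?_, ?_, ?_, ?_, ?_⟩ <;> (split_ifs <;> push_cast <;> omega)
      · rw [if_neg h2]
        by_cases h3 : 41 ≤ x ∧ x ≤ 80
        · rw [if_pos h3, bump3, ih]
          simp only [List.countP_cons, decide_eq_true_eq, List.cons.injEq, Prod.mk.injEq,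
            true_and, and_true]
          refine ⟨?_, ?_, ?_, ?_, ?_⟩ <;> (split_ifs <;> push_cast <;> omega)
        · rw [if_neg h3]
          by_cases h4 : 81 ≤ x ∧ x ≤ 120
          · rw [if_pos h4, bump4, ih]
            simp only [List.countP_cons, decide_eq_true_eq, List.cons.injEq, Prod.mk.injEq,
              true_and, and_true]
            refine ⟨?_, ?_, ?_, ?_, ?_⟩ <;> (split_ifs <;> push_cast <;> omega)
          · rw [if_neg h4, bump5, ih]
            simp only [List.countP_cons, decide_eq_true_eq, List.cons.injEq, Prod.mk.injEq,
              true_and, and_true]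
            refine ⟨?_, ?_, ?_, ?_, ?_⟩ <;> (split_ifs <;> push_cast <;> omega)

-- ===== VERDICT (by name: the statement is the Claim_ definition above) =====
theorem get_length_distribution_py_spec : Claim_equal_get_length_distribution_py := by
  intro lengths _
  unfold Spec_get_length_distribution_py get_length_distribution_py get_length_distribution_py_alt
  simp only [fold_counts, zero_add]
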